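-- pv_equiv track=rewrite | github.com/Mousatat/Distributed-And-Network-Programming | Lab3/Solution/primer.py | check_unvalid
-- ===== SOURCE A (Python) =====
-- def check_unvalid(rec):
--     if len(rec)<9:
--         return True
--     if rec[:8] !="isprime ":
--         return True
--     for i in range(8,len(rec)):
--         if rec[i]<'0' or rec[i]>'9':
--             return True
--     return False
-- ===== SOURCE B (Python) =====
-- import re
--
-- _VALID = re.compile(r'isprime [0-9]+')
--
-- def check_unvalid(rec):
--     # valid iff the whole string is the literal prefix "isprime " followed by 1+ ASCII digits
--     return _VALID.fullmatch(rec) is None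
-- ===== Notes on version B (the rewrite author's own statement) =====
-- stated objective: idiomatic
-- what changed: Replaced the manual length/prefix checks and index-by-index digit loop with a single anchored regular-expression match re.fullmatch(r'isprime [0-9]+', rec).
import Mathlib
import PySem

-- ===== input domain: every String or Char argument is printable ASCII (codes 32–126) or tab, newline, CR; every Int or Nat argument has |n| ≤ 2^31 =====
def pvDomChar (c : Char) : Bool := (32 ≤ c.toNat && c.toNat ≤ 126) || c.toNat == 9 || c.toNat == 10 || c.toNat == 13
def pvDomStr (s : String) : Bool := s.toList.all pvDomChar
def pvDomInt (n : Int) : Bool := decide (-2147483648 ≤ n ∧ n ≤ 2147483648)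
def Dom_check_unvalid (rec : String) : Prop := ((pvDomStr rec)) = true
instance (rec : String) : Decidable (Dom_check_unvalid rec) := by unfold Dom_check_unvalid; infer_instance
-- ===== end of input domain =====

-- B replaces A's manual length/prefix checks and per-index digit loop with a single anchored regex fullmatch (idiomatic; equivalence of return values proved below).


-- ===== PORT A =====
-- A's 'for i in range(8, len(rec))' digit loop with early return True
def checkA_loop (cs : List Char) : List Int → Bool
  | [] => false
  | i :: rest =>
    if PySem.List.pyGetD cs i ' ' < '0' || '9' < PySem.List.pyGetD cs i ' ' then true
    else checkA_loop cs rest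

def check_unvalid (rec : String) : Bool :=
  let cs := rec.toList
  if cs.length < 9 then true
  else if PySem.List.slice cs none (some 8) ≠ "isprime ".toList then true
  else checkA_loop cs (PySem.List.pyRange 8 cs.length 1)

-- ===== PORT B =====
-- hand port of re.fullmatch(r'isprime [0-9]+', rec): the anchored pattern matches iff the
-- string is the 8 literal chars 'isprime ' followed by one-or-more chars in '0'..'9' (exact:
-- [0-9] is exactly the ASCII digit range, fullmatch anchors both ends)
def fullmatchIsprime : List Char → Bool
  | 'i' :: 's' :: 'p' :: 'r' :: 'i' :: 'm' :: 'e' :: ' ' :: rest =>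
    !rest.isEmpty && rest.all (fun c => '0' ≤ c && c ≤ '9')
  | _ => false

def check_unvalid_alt (rec : String) : Bool :=
  !fullmatchIsprime rec.toList

-- ===== PRECONDITION & SPEC =====
def Spec_check_unvalid (rec : String) (out : Bool) : Prop := out = check_unvalid_alt rec
instance (rec : String) (out : Bool) : Decidable (Spec_check_unvalid rec out) := by unfold Spec_check_unvalid; infer_instance

-- ===== CLAIM (what is proved, stated in full; the proofs are below) =====
def Claim_equal_check_unvalid : Prop := ∀ (rec : String), Dom_check_unvalid rec → Spec_check_unvalid rec (check_unvalid rec)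

-- ===== LEMMAS AND PROOFS =====

-- A's index loop from j computes the negation of "all of drop j are digits"
theorem checkA_loop_eq (cs : List Char) (j : Nat) (h : j ≤ cs.length) :
    checkA_loop cs (PySem.List.pyRange (j : Int) (cs.length : Int) 1)
      = !((cs.drop j).all (fun c => '0' ≤ c && c ≤ '9')) := by
  induction hn : cs.length - j generalizing j with
  | zero =>
    have hj : j = cs.length := by omega
    subst hj
    rw [PySem.List.pyRange_one_eq_nil (by omega)]
    simp [checkA_loop]
  | succ n ih =>
    have hj : j < cs.length := by omega
    rw [PySem.List.pyRange_one_cons (by exact_mod_cast hj)]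
    have hdrop : cs.drop j = cs[j] :: cs.drop (j + 1) := (List.drop_eq_getElem_cons hj)
    have hget : PySem.List.pyGetD cs (j : Int) ' ' = cs[j] :=
      PySem.List.pyGetD_ofNat cs j ' ' hj
    have hcast : ((j : Int) + 1) = ((j + 1 : Nat) : Int) := by push_cast; ring
    rw [checkA_loop, hget, hcast, ih (j + 1) (by omega) (by omega)]
    by_cases h0 : cs[j] < '0'
    · rw [if_pos (by simp [h0]), hdrop]
      simp only [List.all_cons]
      simp [not_le.mpr h0]
    · by_cases h9 : '9' < cs[j]
      · rw [if_pos (by simp [h9]), hdrop]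
        simp only [List.all_cons]
        simp [not_le.mpr h9]
      · rw [if_neg (by simp [not_lt.mp h0, not_lt.mp h9])]
        conv_rhs => rw [hdrop]
        simp only [List.all_cons]
        simp [not_lt.mp h0, not_lt.mp h9]

theorem check_unvalid_spec : Claim_equal_check_unvalid := by
  unfold Claim_equal_check_unvalid
  intro rec _
  unfold Spec_check_unvalid check_unvalid check_unvalid_alt
  set cs := rec.toList with hcs
  clear hcs
  simp only []
  rcases cs with _ | ⟨c1, cs⟩; · decide
  rcases cs with _ | ⟨c2, cs⟩; · simp [fullmatchIsprime]
  rcases cs with _ | ⟨c3, cs⟩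
  · simp only [List.length_cons, List.length_nil]; norm_num
    unfold fullmatchIsprime; split <;> simp_all
  rcases cs with _ | ⟨c4, cs⟩
  · simp only [List.length_cons, List.length_nil]; norm_num
    unfold fullmatchIsprime; split <;> simp_all
  rcases cs with _ | ⟨c5, cs⟩
  · simp only [List.length_cons, List.length_nil]; norm_num
    unfold fullmatchIsprime; split <;> simp_all
  rcases cs with _ | ⟨c6, cs⟩
  · simp only [List.length_cons, List.length_nil]; norm_num
    unfold fullmatchIsprime; split <;> simp_all
  rcases cs with _ | ⟨c7, cs⟩
  · simp only [List.length_cons, List.length_nil]; norm_num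
    unfold fullmatchIsprime; split <;> simp_all
  rcases cs with _ | ⟨c8, cs⟩
  · simp only [List.length_cons, List.length_nil]; norm_num
    unfold fullmatchIsprime; split <;> simp_all
  rcases cs with _ | ⟨c9, cs⟩
  · -- length exactly 8: A returns true (len<9), B: rest empty → no match → true
    simp only [List.length_cons, List.length_nil]; norm_num
    unfold fullmatchIsprime; split <;> simp_all
  · -- length ≥ 9
    set rest := c9 :: cs with hrest
    have hlen : ¬ (c1 :: c2 :: c3 :: c4 :: c5 :: c6 :: c7 :: c8 :: rest).length < 9 := by
      simp [hrest]
    rw [if_neg hlen]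
    by_cases hpre : PySem.List.slice (c1 :: c2 :: c3 :: c4 :: c5 :: c6 :: c7 :: c8 :: rest)
        none (some 8) = "isprime ".toList
    · rw [if_neg (by simp [hpre])]
      have h8 : PySem.List.slice (c1 :: c2 :: c3 :: c4 :: c5 :: c6 :: c7 :: c8 :: rest)
          none (some 8) = [c1, c2, c3, c4, c5, c6, c7, c8] := by
        have := PySem.List.slice_to_natCast
          (xs := c1 :: c2 :: c3 :: c4 :: c5 :: c6 :: c7 :: c8 :: rest) (b := 8)
        simpa using this
      rw [h8] at hpre
      have hc : c1 = 'i' ∧ c2 = 's' ∧ c3 = 'p' ∧ c4 = 'r' ∧ c5 = 'i' ∧ c6 = 'm' ∧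
          c7 = 'e' ∧ c8 = ' ' := by
        have := hpre; simp_all
      obtain ⟨h1, h2, h3, h4, h5, h6, h7, h8'⟩ := hc
      subst h1 h2 h3 h4 h5 h6 h7 h8'
      have hloop := checkA_loop_eq
        ('i' :: 's' :: 'p' :: 'r' :: 'i' :: 'm' :: 'e' :: ' ' :: rest) 8 (by simp)
      push_cast at hloop
      rw [hloop]
      simp [fullmatchIsprime, hrest]
    · rw [if_pos (by simpa using hpre)]
      unfold fullmatchIsprime
      split
      · rename_i heq
        exfalso
        apply hpre
        injection heq with e1 heq; injection heq with e2 heq; injection heq with e3 heq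
        injection heq with e4 heq; injection heq with e5 heq; injection heq with e6 heq
        injection heq with e7 heq; injection heq with e8 heq
        subst e1 e2 e3 e4 e5 e6 e7 e8
        have := PySem.List.slice_to_natCast
          (xs := 'i' :: 's' :: 'p' :: 'r' :: 'i' :: 'm' :: 'e' :: ' ' :: rest) (b := 8)
        simpa using this
      · simp
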